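-- pv_equiv track=rewrite | github.com/SebinYu-hub/PS2 | solution/66.py | solution
-- ===== SOURCE A (Python) =====
-- from collections import Counter
--
-- def solution(topping):
--     """
--     [Input]
--     1. topping: List[int]
--        - 토핑 종류가 담긴 배열
--        - 제약: len(topping) > 0
--        - 제약: 각 원소는 토핑 종류를 나타내는 양의 정수
--
--     [Output]
--     - result: int
--       - 롤케이크를 공평하게 자르는 방법의 수
--       - 제약: result >= 0
--       - 제약: 각 조각의 토핑 종류 수가 같아야 함
--     """
--     """
--     [문제 특징] : [알고리즘 선택 이유]
--     1. 토핑 종류 카운팅 필요 : Counter 자료구조 활용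
--     2. 양쪽 토핑 비교 필요 : Set으로 중복 제거
--     3. 모든 자르는 위치 확인 : 선형 순회 필요
--     4. 동적인 토핑 개수 관리 : Counter 증감 연산
--     5. 빈도수 관리 필요 : 해시맵 기반 접근
--     """
--     """
--     [자료구조]
--     - right_counter: Counter
--       - 목적: 오른쪽 토핑 종류별 개수 관리
--       - 특징: O(1) 접근/수정
--     - left_set: Set
--       - 목적: 왼쪽 토핑 종류 관리
--       - 특징: O(1) 탐색/추가
--
--     [알고리즘: Two Pointers with Counter]
--     procedure find_fair_cuts(topping):
--         1. Initialize:
--            - right_counter로 전체 토핑 개수 계산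
--            - left_set 빈 집합으로 초기화
--            - result = 0
--
--         2. For each t in topping:
--            - left_set에 토핑 추가
--            - right_counter에서 토핑 제거
--            - if 양쪽 토핑 종류 수 같으면:
--                result 증가
--
--         3. Return result
--     """
--
--     # 최적화 1: Counter로 전체 토핑 개수 계산
--     # @reference/counter.py 참조
--     right_counter = Counter(topping)
--
--     # 최적화 2: 왼쪽 토핑 종류를 저장할 set
--     # @performance/list_vs_set_in.py 참조
--     left_set = set()
--     result = 0
--
--     # 최적화 3: 토핑을 하나씩 옮기며 개수 비교
--     for t in topping:
--         # 최적화 4: 왼쪽에 토핑 추가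
--         left_set.add(t)
--
--         # 최적화 5: 오른쪽에서 토핑 제거
--         right_counter[t] -= 1
--         if right_counter[t] == 0:
--             right_counter.pop(t)
--
--         # 최적화 6: 양쪽 토핑 종류 수 비교
--         if len(left_set) == len(right_counter):
--             result += 1
--
--     return result
-- ===== SOURCE B (Python) =====
-- def solution(topping):
--     # suffix[i] = number of distinct toppings in topping[i:], suffix[len] = 0
--     suffix = [0]
--     seen = set()
--     for t in reversed(topping):
--         seen.add(t)
--         suffix.append(len(seen))
--     suffix.reverse()
--     prefix = set()
--     result = 0
--     for t, s in zip(topping, suffix[1:]):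
--         prefix.add(t)
--         if len(prefix) == s:
--             result += 1
--     return result
-- ===== Notes on version B (the rewrite author's own statement) =====
-- stated objective: alternative
-- what changed: Replaces A's live Counter that is decremented and popped during the left-to-right scan with a precomputed suffix-distinct table built in a separate right-to-left pass over a set, then a prefix-set scan compares against the table.
import Mathlib
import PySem

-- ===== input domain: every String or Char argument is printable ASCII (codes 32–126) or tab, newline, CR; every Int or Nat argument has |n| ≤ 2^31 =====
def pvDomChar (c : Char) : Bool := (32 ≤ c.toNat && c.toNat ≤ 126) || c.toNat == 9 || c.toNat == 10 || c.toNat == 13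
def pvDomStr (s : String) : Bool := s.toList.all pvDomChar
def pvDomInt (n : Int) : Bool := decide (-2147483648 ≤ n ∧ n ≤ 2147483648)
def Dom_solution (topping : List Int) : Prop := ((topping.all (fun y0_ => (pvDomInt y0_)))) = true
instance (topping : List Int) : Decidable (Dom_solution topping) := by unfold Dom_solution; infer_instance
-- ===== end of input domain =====

-- B precomputes a table of right-side distinct counts instead of A's live decremented Counter (objective: alternative decomposition; same return value).

-- ===== PORT A =====
-- loop body of A's single pass: add t to the left set, decrement (and pop at 0) in the right counter, compare variety counts
def solutionStep (st : PySem.Dict Int Int × PySem.Set Int × Int) (t : Int) :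
    PySem.Dict Int Int × PySem.Set Int × Int :=
  let leftSet := PySem.Set.add st.2.1 t
  let rc0 := st.1.modify t 0 (fun v => v - 1)
  let rc := if rc0.getD t 0 = 0 then rc0.erase t else rc0
  let res := if leftSet.length = rc.size then st.2.2 + 1 else st.2.2
  (rc, leftSet, res)

def solution (topping : List Int) : Int :=
  (topping.foldl solutionStep (PySem.Dict.counter topping, PySem.Set.empty, 0)).2.2

-- ===== PORT B =====
-- right-to-left pass of B: grow the seen-set, append its size
def altSuffixStep (acc : PySem.Set Int × List Int) (t : Int) : PySem.Set Int × List Int :=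
  let seen := PySem.Set.add acc.1 t
  (seen, acc.2 ++ [(seen.length : Int)])

-- left-to-right pass of B: grow the prefix set, compare with the tabulated suffix count
def altCountStep (st : PySem.Set Int × Int) (p : Int × Int) : PySem.Set Int × Int :=
  let pre := PySem.Set.add st.1 p.1
  (pre, if (pre.length : Int) = p.2 then st.2 + 1 else st.2)

def solution_alt (topping : List Int) : Int :=
  let suffix := (topping.reverse.foldl altSuffixStep (PySem.Set.empty, [(0 : Int)])).2.reverse
  ((topping.zip (suffix.drop 1)).foldl altCountStep (PySem.Set.empty, 0)).2

-- ===== PRECONDITION & SPEC =====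
def Spec_solution (topping : List Int) (out : Int) : Prop := out = solution_alt topping
instance (topping : List Int) (out : Int) : Decidable (Spec_solution topping out) := by unfold Spec_solution; infer_instance

-- ===== CLAIM (what is proved, stated in full; the proofs are below) =====
def Claim_equal_solution : Prop := ∀ (topping : List Int), Dom_solution topping → Spec_solution topping (solution topping)

-- ===== LEMMAS AND PROOFS =====

-- number of distinct elements of a list
def dNum (s : List Int) : Nat := (PySem.Set.ofList s).length

-- common reference count: positions of the common left-to-right scan, recursing on the rest
def cnt (lset : PySem.Set Int) : List Int → Int
  | [] => 0
  | t :: s' =>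
      (if (PySem.Set.add lset t).length = dNum s' then 1 else 0) + cnt (PySem.Set.add lset t) s'

lemma length_eq_dNum (l s : List Int) (hnd : l.Nodup) (hmem : ∀ k, k ∈ l ↔ k ∈ s) :
    l.length = dNum s := by
  have h : l.Perm (PySem.Set.ofList s) := by
    rw [List.perm_ext_iff_of_nodup hnd (PySem.Set.nodup_ofList s)]
    intro a
    rw [PySem.Set.mem_ofList]
    exact hmem a
  exact h.length_eq

-- facts about Dict.erase (none are in the prelude)
lemma get?_erase_dict (d : PySem.Dict Int Int) (k k' : Int) :
    (d.erase k).get? k' = if k' = k then none else d.get? k' := by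
  rcases d with ⟨items⟩
  induction items with
  | nil => simp [PySem.Dict.erase, PySem.Dict.get?]
  | cons p rest ih =>
      simp only [PySem.Dict.erase, PySem.Dict.get?, List.filter_cons] at *
      by_cases h1 : p.1 = k <;> by_cases h2 : p.1 = k' <;> by_cases h3 : k' = k <;>
        simp_all

lemma getD_erase_dict (d : PySem.Dict Int Int) (k k' : Int) (v : Int) :
    (d.erase k).getD k' v = if k' = k then v else d.getD k' v := by
  simp only [PySem.Dict.getD, get?_erase_dict]
  by_cases h : k' = k <;> simp [h]

lemma keys_erase_dict (d : PySem.Dict Int Int) (k : Int) :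
    (d.erase k).keys = d.keys.filter (fun x => !(x == k)) := by
  rcases d with ⟨items⟩
  induction items with
  | nil => simp [PySem.Dict.erase, PySem.Dict.keys]
  | cons p rest ih =>
      by_cases h : p.1 = k <;>
        simp_all [PySem.Dict.erase, PySem.Dict.keys]

lemma size_eq_keys_length (d : PySem.Dict Int Int) : d.size = d.keys.length := by
  simp [PySem.Dict.size, PySem.Dict.keys]

-- A's loop: under the counter invariant, the pass adds cnt to the accumulator
lemma loopA (s : List Int) : ∀ (c : PySem.Dict Int Int) (lset : PySem.Set Int) (r : Int),
    (∀ k, c.getD k 0 = (s.count k : Int)) → c.keys.Nodup → (∀ k, k ∈ c.keys ↔ k ∈ s) →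
    (s.foldl solutionStep (c, lset, r)).2.2 = r + cnt lset s := by
  induction s with
  | nil => intro c lset r _ _ _; simp [cnt]
  | cons t s' ih =>
      intro c lset r hget hnd hmem
      have hcount : c.getD t 0 = ((s'.count t : Nat) : Int) + 1 := by
        have := hget t; simpa [List.count_cons] using this
      have hget1 : ∀ k, (c.modify t 0 (fun v => v - 1)).getD k 0 = (s'.count k : Int) := by
        intro k
        rw [PySem.Dict.getD_modify]
        by_cases h : k = t
        · simp [h, hcount]
        · have := hget k
          simp only [h, if_false]
          rw [this, List.count_cons]
          have hne : t ≠ k := fun he => h he.symm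
          simp [hne]
      set c1 := c.modify t 0 (fun v => v - 1) with hc1
      have hnd1 : c1.keys.Nodup := by
        rw [hc1, PySem.Dict.keys_modify]
        exact PySem.Dict.nodup_keys_insert _ _ _ hnd
      have hmem1 : ∀ k, k ∈ c1.keys ↔ k ∈ t :: s' := by
        intro k
        rw [hc1, PySem.Dict.keys_modify, PySem.Dict.mem_keys_insert, hmem]
        simp
      -- the counter after the decrement-and-maybe-pop step
      set c2 := if c1.getD t 0 = 0 then c1.erase t else c1 with hc2
      have hget2 : ∀ k, c2.getD k 0 = (s'.count k : Int) := by
        intro k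
        rw [hc2]
        split_ifs with h0
        · rw [getD_erase_dict]
          by_cases h : k = t
          · have : c1.getD t 0 = (s'.count t : Int) := hget1 t
            rw [h0] at this
            simp [h, ← this]
          · simp [h, hget1 k]
        · exact hget1 k
      have hnd2 : c2.keys.Nodup := by
        rw [hc2]; split_ifs with h0
        · rw [keys_erase_dict]; exact hnd1.filter _
        · exact hnd1
      have hmem2 : ∀ k, k ∈ c2.keys ↔ k ∈ s' := by
        intro k
        rw [hc2]
        split_ifs with h0
        · rw [keys_erase_dict, List.mem_filter]
          have htnot : t ∉ s' := by
            have : (s'.count t : Int) = 0 := by rw [← hget1 t, h0]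
            have : s'.count t = 0 := by exact_mod_cast this
            exact (List.count_eq_zero.mp this)
          constructor
          · rintro ⟨hk, hne⟩
            have hne' : k ≠ t := by simpa using hne
            have := (hmem1 k).mp hk
            rcases List.mem_cons.mp this with h | h
            · exact absurd h hne'
            · exact h
          · intro hk
            have hne : k ≠ t := fun he => htnot (he ▸ hk)
            exact ⟨(hmem1 k).mpr (List.mem_cons_of_mem _ hk), by simpa using hne⟩
        · have htin : t ∈ s' := by
            have h0' : c1.getD t 0 ≠ 0 := h0
            rw [hget1 t] at h0'
            have : s'.count t ≠ 0 := by exact_mod_cast h0'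
            exact List.count_pos_iff.mp (Nat.pos_of_ne_zero this)
          rw [hmem1 k, List.mem_cons]
          constructor
          · rintro (h | h)
            · exact h ▸ htin
            · exact h
          · exact Or.inr
      have hsize : c2.size = dNum s' := by
        rw [size_eq_keys_length]
        exact length_eq_dNum _ _ hnd2 hmem2
      have hstep : solutionStep (c, lset, r) t
          = (c2, PySem.Set.add lset t,
             if (PySem.Set.add lset t).length = dNum s' then r + 1 else r) := by
        simp only [solutionStep, hsize, ← hc1, ← hc2]
      rw [List.foldl_cons, hstep, ih c2 _ _ hget2 hnd2 hmem2, cnt]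
      split_ifs with h <;> ring

-- B's right-to-left pass, as a pure recursion
def grow (s0 : PySem.Set Int) : List Int → List Int
  | [] => []
  | t :: l => ((PySem.Set.add s0 t).length : Int) :: grow (PySem.Set.add s0 t) l

lemma foldl_altSuffixStep (l : List Int) : ∀ (s0 : PySem.Set Int) (acc : List Int),
    l.foldl altSuffixStep (s0, acc) = (l.foldl PySem.Set.add s0, acc ++ grow s0 l) := by
  induction l with
  | nil => intro s0 acc; simp [grow]
  | cons t l ih =>
      intro s0 acc
      simp [altSuffixStep, grow, ih]

lemma grow_append (a b : List Int) : ∀ s0 : PySem.Set Int,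
    grow s0 (a ++ b) = grow s0 a ++ grow (a.foldl PySem.Set.add s0) b := by
  induction a with
  | nil => intro s0; simp [grow]
  | cons t a ih => intro s0; simp [grow, ih]

-- the table B fills: distinct counts of the proper suffixes, front to back
def suffVals : List Int → List Int
  | [] => []
  | t :: s' => ((dNum (t :: s') : Nat) : Int) :: suffVals s'

lemma grow_reverse (l : List Int) :
    grow PySem.Set.empty l.reverse = (suffVals l).reverse := by
  induction l with
  | nil => simp [grow, suffVals]
  | cons t s' ih =>
      have hlen : (PySem.Set.add (PySem.Set.ofList s'.reverse) t).length = dNum (t :: s') := by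
        apply length_eq_dNum
        · exact PySem.Set.nodup_add _ _ (PySem.Set.nodup_ofList _)
        · intro k
          rw [PySem.Set.mem_add, PySem.Set.mem_ofList, List.mem_reverse, List.mem_cons]
          tauto
      calc grow PySem.Set.empty (t :: s').reverse
      = grow PySem.Set.empty (s'.reverse ++ [t]) := by simp
      _ = grow PySem.Set.empty s'.reverse
            ++ grow (s'.reverse.foldl PySem.Set.add PySem.Set.empty) [t] := grow_append _ _ _
      _ = (suffVals s').reverse ++ [((dNum (t :: s') : Nat) : Int)] := by
            rw [ih]
            simp only [PySem.Set.empty_eq]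
            rw [← PySem.Set.ofList_eq_foldl]
            simp [grow, hlen]
      _ = (suffVals (t :: s')).reverse := by simp [suffVals]

-- B's counting pass against the table computes cnt
lemma loopB (s : List Int) : ∀ (lset : PySem.Set Int) (r : Int),
    ((s.zip ((suffVals s ++ [(0 : Int)]).drop 1)).foldl altCountStep (lset, r)).2
      = r + cnt lset s := by
  induction s with
  | nil => intro lset r; simp [cnt, suffVals]
  | cons t s' ih =>
      intro lset r
      have hshape : suffVals s' ++ [(0 : Int)]
          = ((dNum s' : Nat) : Int) :: ((suffVals s' ++ [(0 : Int)]).drop 1) := by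
        cases s' with
        | nil => simp [suffVals, dNum, PySem.Set.ofList]
        | cons u s'' => simp [suffVals]
      have hzip : (t :: s').zip ((suffVals (t :: s') ++ [(0 : Int)]).drop 1)
          = (t, ((dNum s' : Nat) : Int)) :: s'.zip ((suffVals s' ++ [(0 : Int)]).drop 1) := by
        conv_lhs => rw [suffVals, List.cons_append, List.drop_succ_cons, List.drop_zero, hshape]
        rw [List.zip_cons_cons]
      rw [hzip, List.foldl_cons]
      have hstep : altCountStep (lset, r) (t, ((dNum s' : Nat) : Int))
          = (PySem.Set.add lset t,
             if (PySem.Set.add lset t).length = dNum s' then r + 1 else r) := by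
        simp only [altCountStep, Nat.cast_inj]
      rw [hstep, ih, cnt]
      split_ifs with h <;> ring

-- ===== VERDICT (by name: the statement is the Claim_ definition above) =====
theorem solution_spec : Claim_equal_solution := by
  intro topping _
  unfold Spec_solution solution solution_alt
  have hA := loopA topping (PySem.Dict.counter topping) PySem.Set.empty 0
    (by intro k; exact PySem.Dict.getD_counter topping k)
    (PySem.Dict.nodup_keys_counter topping)
    (by intro k; rw [PySem.Dict.keys_counter, PySem.Set.mem_ofList])
  have hsuffix : (topping.reverse.foldl altSuffixStep (PySem.Set.empty, [(0 : Int)])).2.reverse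
      = suffVals topping ++ [(0 : Int)] := by
    rw [foldl_altSuffixStep, grow_reverse]
    simp
  rw [hA, hsuffix, loopB]
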